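-- pv_equiv track=rewrite | github.com/hendrydong/mdlm-order | train/pretrain_random_attn.py | collapse_k_unique
-- ===== SOURCE A (Python) =====
-- def collapse_k_unique(lst, k: int):
--     if k <= 0:
--         raise ValueError("k must be > 0")
--     uniq = sorted(set(lst))
--     mapping = {}
--     n = len(uniq)
--     for idx, val in enumerate(uniq):
--         group = idx // k
--         end_idx = min((group + 1) * k - 1, n - 1)
--         rep = uniq[end_idx]
--         mapping[val] = rep
--     return [mapping[x] for x in lst]
-- ===== SOURCE B (Python) =====
-- def collapse_k_unique(lst, k: int):
--     if k <= 0: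
--         raise ValueError("k must be > 0")
--     uniq = sorted(set(lst))
--     n = len(uniq)
--     out = []
--     for x in lst:
--         lo, hi = 0, n          # binary search: rank of x in uniq
--         while lo < hi:
--             mid = (lo + hi) // 2
--             if uniq[mid] < x:
--                 lo = mid + 1
--             else:
--                 hi = mid
--         out.append(uniq[min((lo // k + 1) * k - 1, n - 1)])
--     return out
-- ===== Notes on version B (the rewrite author's own statement) =====
-- stated objective: alternative
-- what changed: The precomputed value-to-representative dict (an enumerate pass plus per-element lookup) is gone: each element's rank in the sorted unique list is found by a hand-written binary search, and its representative is read off the sorted array by the same index arithmetic.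
import Mathlib
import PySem

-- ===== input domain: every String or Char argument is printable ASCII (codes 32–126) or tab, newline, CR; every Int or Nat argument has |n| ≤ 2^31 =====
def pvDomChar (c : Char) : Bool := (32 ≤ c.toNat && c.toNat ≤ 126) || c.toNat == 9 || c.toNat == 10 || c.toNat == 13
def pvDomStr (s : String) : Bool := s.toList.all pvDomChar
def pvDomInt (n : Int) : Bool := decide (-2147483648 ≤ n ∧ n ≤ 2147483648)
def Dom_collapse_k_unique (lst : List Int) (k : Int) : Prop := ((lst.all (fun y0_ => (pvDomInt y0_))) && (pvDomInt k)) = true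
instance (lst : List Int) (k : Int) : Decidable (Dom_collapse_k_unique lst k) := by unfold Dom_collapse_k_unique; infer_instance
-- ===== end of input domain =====

-- B drops A's precomputed value→representative dict: each element's rank is found by a
-- hand-written binary search over the sorted unique values, and the representative is read
-- off the sorted array by the same index arithmetic.


-- ===== PORT A =====
def collapse_k_unique (lst : List Int) (k : Int) : List Int :=
  if k ≤ 0 then []  -- raise ValueError("k must be > 0"): excluded by Pre_
  else
    let uniq := PySem.List.sorted (PySem.Set.ofList lst) (fun x => x) false
    let n : Int := uniq.length
    let mapping := (PySem.List.enumerate uniq).foldl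
      (fun m p =>
        let group := PySem.Int.floordiv p.1 k
        let endIdx := min ((group + 1) * k - 1) (n - 1)
        -- uniq[end_idx]: 0 ≤ endIdx ≤ n-1 whenever the loop runs, so IndexError is unreachable
        let rep := PySem.List.pyGetD uniq endIdx 0
        m.insert p.2 rep)
      PySem.Dict.empty
    -- mapping[x]: every x ∈ lst is a key of mapping, so KeyError is unreachable
    lst.map (fun x => mapping.getD x 0)

-- ===== PORT B =====
-- the 'while lo < hi' binary-search loop of Source B, step for step; the loop shrinks hi - lo on
-- every iteration, so the Nat (hi - lo).toNat supplied by pvBisect bounds the iteration count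
def pvBisectAux (uniq : List Int) (x : Int) : Nat → Int → Int → Int
  | 0, lo, _hi => lo
  | fuel + 1, lo, hi =>
    if lo < hi then
      let mid := PySem.Int.floordiv (lo + hi) 2
      -- uniq[mid]: 0 ≤ lo ≤ mid < hi ≤ len(uniq) on every reachable state, so IndexError is unreachable
      if PySem.List.pyGetD uniq mid 0 < x then pvBisectAux uniq x fuel (mid + 1) hi
      else pvBisectAux uniq x fuel lo mid
    else lo

def pvBisect (uniq : List Int) (x : Int) (lo : Int) (hi : Int) : Int :=
  pvBisectAux uniq x (hi - lo).toNat lo hi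

def collapse_k_unique_alt (lst : List Int) (k : Int) : List Int :=
  if k ≤ 0 then []  -- raise ValueError("k must be > 0"): excluded by Pre_
  else
    let uniq := PySem.List.sorted (PySem.Set.ofList lst) (fun x => x) false
    let n : Int := uniq.length
    lst.foldl (fun out x =>
      let lo := pvBisect uniq x 0 n
      -- uniq[...]: the index is always in range (uniq nonempty when lst has an element)
      out ++ [PySem.List.pyGetD uniq (min ((PySem.Int.floordiv lo k + 1) * k - 1) (n - 1)) 0]) []

-- ===== PRECONDITION & SPEC =====
-- Python A raises ValueError exactly when k <= 0.
def Pre_collapse_k_unique (lst : List Int) (k : Int) : Prop := 0 < k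
instance (lst : List Int) (k : Int) : Decidable (Pre_collapse_k_unique lst k) := by unfold Pre_collapse_k_unique; infer_instance
def pvWitness_collapse_k_unique : List Int × Int := ([3, 1, 2, 1, 5], 2)
def Spec_collapse_k_unique (lst : List Int) (k : Int) (out : List Int) : Prop := out = collapse_k_unique_alt lst k
instance (lst : List Int) (k : Int) (out : List Int) : Decidable (Spec_collapse_k_unique lst k out) := by unfold Spec_collapse_k_unique; infer_instance

-- ===== CLAIM (what is proved, stated in full; the proofs are below) =====
def Claim_equal_collapse_k_unique : Prop := ∀ (lst : List Int) (k : Int), Dom_collapse_k_unique lst k → Pre_collapse_k_unique lst k → Spec_collapse_k_unique lst k (collapse_k_unique lst k)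

-- ===== LEMMAS AND PROOFS =====

-- binary search finds the index of its target in a strictly increasing list
theorem pvBisectAux_eq (uniq : List Int) (hpw : uniq.Pairwise (fun a b => a < b))
    (i : Nat) (hilen : i < uniq.length) :
    ∀ (fuel : Nat) (lo hi : Int), (hi - lo).toNat ≤ fuel →
      0 ≤ lo → lo ≤ (i : Int) → (i : Int) ≤ hi → hi ≤ (uniq.length : Int) →
      pvBisectAux uniq uniq[i] fuel lo hi = (i : Int) := by
  have hmono : ∀ (p q : Nat) (hp : p < uniq.length) (hq : q < uniq.length),
      p < q → uniq[p] < uniq[q] := by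
    intro p q hp hq hpq
    exact List.pairwise_iff_getElem.mp hpw p q hp hq hpq
  intro fuel
  induction fuel with
  | zero =>
    intro lo hi hf h0 h1 h2 h3
    simp only [pvBisectAux]
    omega
  | succ f ih =>
    intro lo hi hf h0 h1 h2 h3
    by_cases hlt : lo < hi
    · rw [pvBisectAux, if_pos hlt]
      have hb := PySem.Int.floordiv_two_mid_bounds (le_of_lt hlt)
      have hmidlt : PySem.Int.floordiv (lo + hi) 2 < hi := by
        rw [PySem.Int.floordiv_lt_iff_lt_mul (by norm_num)]
        omega
      set mid := PySem.Int.floordiv (lo + hi) 2 with hmid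
      have hmidn : mid.toNat < uniq.length := by omega
      have hget : PySem.List.pyGetD uniq mid 0 = uniq[mid.toNat] := by
        apply PySem.List.pyGetD_eq_getElem <;> omega
      simp only [hget]
      by_cases hc : uniq[mid.toNat] < uniq[i]
      · rw [if_pos hc]
        have hmi : mid < (i : Int) := by
          by_contra hcon
          have him : i ≤ mid.toNat := by omega
          rcases Nat.lt_or_ge i mid.toNat with hlt' | hge
          · exact absurd (hmono i mid.toNat hilen hmidn hlt') (lt_asymm hc)
          · simp only [show mid.toNat = i from by omega] at hc
            exact lt_irrefl _ hc
        exact ih (mid + 1) hi (by omega) (by omega) (by omega) h2 h3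
      · rw [if_neg hc]
        have him : (i : Int) ≤ mid := by
          by_contra hcon
          exact hc (hmono mid.toNat i hmidn hilen (by omega))
        exact ih lo mid (by omega) h0 h1 him (by omega)
    · rw [pvBisectAux, if_neg hlt]
      omega

theorem collapse_k_unique_spec : Claim_equal_collapse_k_unique := by
  intro lst k hdom hpre
  unfold Spec_collapse_k_unique collapse_k_unique collapse_k_unique_alt
  have hk : ¬ k ≤ 0 := not_le.mpr hpre
  simp only [if_neg hk]
  set uniq := PySem.List.sorted (PySem.Set.ofList lst) (fun x => x) false with huniq
  have hpw : uniq.Pairwise (fun a b => a < b) := PySem.List.sorted_ofList_pairwise_lt lst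
  have hnd : uniq.Nodup := hpw.imp (fun h => ne_of_lt h)
  set rep : Int → Int := fun i =>
    PySem.List.pyGetD uniq (min ((PySem.Int.floordiv i k + 1) * k - 1) ((uniq.length : Int) - 1)) 0 with hrep
  have hitems :
      ((PySem.List.enumerate uniq).foldl
        (fun m p => m.insert p.2 (rep p.1)) PySem.Dict.empty).items
        = (PySem.List.enumerate uniq).map (fun p => (p.2, rep p.1)) := by
    have h := PySem.Dict.items_foldl_insert_fresh (PySem.List.enumerate uniq) Prod.snd
      (fun p => rep p.1) PySem.Dict.empty
      (fun _ _ => PySem.Dict.contains_empty _)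
      (by simpa [PySem.List.map_snd_enumerate] using hnd)
    simpa using h
  have hkeys :
      ((PySem.List.enumerate uniq).foldl
        (fun m p => m.insert p.2 (rep p.1)) PySem.Dict.empty).keys.Nodup := by
    exact PySem.Dict.nodup_keys_foldl_insert_key (PySem.List.enumerate uniq) Prod.snd
      (fun _ p => rep p.1) PySem.Dict.empty PySem.Dict.nodup_keys_empty
  rw [PySem.List.foldl_append_singleton_eq_map]
  refine List.map_congr_left ?_
  intro x hx
  have hxu : x ∈ uniq := by
    rw [huniq, PySem.List.mem_sorted, PySem.Set.mem_ofList]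
    exact hx
  obtain ⟨i, hi, hxi⟩ := List.mem_iff_getElem.mp hxu
  have hmem : (x, rep (i : Int)) ∈
      (PySem.List.enumerate uniq).map (fun p => (p.2, rep p.1)) := by
    refine List.mem_map.mpr ⟨((i : Int), x), ?_, rfl⟩
    rw [PySem.List.mem_enumerate_iff]
    exact ⟨i, hi, by simp [hxi]⟩
  have hA : ((PySem.List.enumerate uniq).foldl
        (fun m p => m.insert p.2 (rep p.1)) PySem.Dict.empty).getD x 0 = rep (i : Int) := by
    exact PySem.Dict.getD_of_mem_items _ (by rw [hitems]; exact hmem) hkeys 0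
  have hB : pvBisect uniq x 0 (uniq.length : Int) = (i : Int) := by
    rw [← hxi, pvBisect]
    exact pvBisectAux_eq uniq hpw i hi ((uniq.length : Int) - 0).toNat 0 (uniq.length : Int)
      (le_refl _) (le_refl 0) (by omega) (by omega) (le_refl _)
  simp only [hB]
  exact hA
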